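-- pv_equiv track=rewrite | github.com/LightspeedDMS/code-indexer | src/code_indexer/server/services/audit_log_service.py | _extract_target_id
-- ===== SOURCE A (Python) =====
-- _PR_ACTION_TYPES = (
--     "pr_creation_success",
--     "pr_creation_failure",
--     "pr_creation_disabled",
-- )
--
-- _CLEANUP_ACTION_TYPE = "git_cleanup"
--
-- def _extract_target_id(entry: dict) -> str:
--     """Derive target_id from a migrated flat-file entry."""
--     event_type = entry.get("event_type", "")
--     if event_type in _PR_ACTION_TYPES:
--         return str(entry.get("repo_alias") or entry.get("job_id") or "unknown")
--     if event_type == _CLEANUP_ACTION_TYPE: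
--         return str(entry.get("repo_path") or "unknown")
--     # Impersonation: target is the impersonated user
--     if event_type in ("impersonation_set", "impersonation_cleared"):
--         return str(
--             entry.get("target_username") or entry.get("previous_target") or "unknown"
--         )
--     # Auth events: use username or email
--     for key in ("username", "actor_username", "email"):
--         if entry.get(key):
--             return str(entry[key])
--     return "unknown"
-- ===== SOURCE B (Python) =====
-- _RANKS_PR = {"repo_alias": 0, "job_id": 1}
-- _RANKS_CLEANUP = {"repo_path": 0}
-- _RANKS_IMPERSONATION = {"target_username": 0, "previous_target": 1}
-- _RANKS_AUTH = {"username": 0, "actor_username": 1, "email": 2}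
--
-- _RANK_TABLE = {
--     "pr_creation_success": _RANKS_PR,
--     "pr_creation_failure": _RANKS_PR,
--     "pr_creation_disabled": _RANKS_PR,
--     "git_cleanup": _RANKS_CLEANUP,
--     "impersonation_set": _RANKS_IMPERSONATION,
--     "impersonation_cleared": _RANKS_IMPERSONATION,
-- }
--
--
-- def _extract_target_id(entry: dict) -> str:
--     """Derive target_id: a single pass over the entry's own items, keeping the
--     truthy value whose key has the smallest priority rank for this event_type."""
--     ranks = _RANK_TABLE.get(entry.get("event_type", ""), _RANKS_AUTH)
--     best = None  # (rank, value) with the smallest rank seen so far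
--     for key, value in entry.items():
--         rank = ranks.get(key)
--         if rank is not None and value and (best is None or rank < best[0]):
--             best = (rank, value)
--     return str(best[1]) if best is not None else "unknown"
-- ===== Notes on version B (the rewrite author's own statement) =====
-- stated objective: alternative
-- what changed: Instead of probing a fixed sequence of candidate keys with repeated dict lookups in an if/elif chain, B makes one pass over the entry's own items and keeps the truthy value whose key has the smallest priority rank for the event type; Pre_ excludes association lists with duplicate keys, which represent no Python dict and on which A's first-match lookup vs B's whole-list scan could accidentally differ.
import Mathlib
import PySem

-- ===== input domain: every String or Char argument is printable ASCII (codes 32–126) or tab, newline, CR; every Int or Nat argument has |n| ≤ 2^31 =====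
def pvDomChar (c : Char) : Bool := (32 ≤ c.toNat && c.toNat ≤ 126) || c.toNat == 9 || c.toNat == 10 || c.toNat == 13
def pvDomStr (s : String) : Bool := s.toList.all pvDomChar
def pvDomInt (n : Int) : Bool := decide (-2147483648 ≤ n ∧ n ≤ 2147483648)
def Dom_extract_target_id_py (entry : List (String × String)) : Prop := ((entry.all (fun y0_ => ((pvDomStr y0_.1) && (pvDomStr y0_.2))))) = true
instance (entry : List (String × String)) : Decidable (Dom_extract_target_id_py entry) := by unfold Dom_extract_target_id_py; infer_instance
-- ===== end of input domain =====

-- B replaces A's if/elif chain of per-key dict probes by a single pass over the entry's own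
-- items that keeps the truthy value whose key has the smallest priority rank (objective:
-- alternative); return values are identical on duplicate-key-free association lists.

-- ===== PORT A =====
-- entry.get(k) with default: values are strings, missing key and "" are both falsy → default "".
def pyGetDA (entry : List (String × String)) (k : String) : String :=
  (entry.lookup k).getD ""

-- the final `for key in ("username", "actor_username", "email"): if entry.get(key): return str(entry[key])`
def authLoopA (entry : List (String × String)) : List String → String
  | [] => "unknown"
  | k :: ks => if pyGetDA entry k ≠ "" then pyGetDA entry k else authLoopA entry ks

def extract_target_id_py (entry : List (String × String)) : String :=
  if pyGetDA entry "event_type" = "pr_creation_success" ∨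
      pyGetDA entry "event_type" = "pr_creation_failure" ∨
      pyGetDA entry "event_type" = "pr_creation_disabled" then
    -- str(entry.get("repo_alias") or entry.get("job_id") or "unknown")
    if pyGetDA entry "repo_alias" ≠ "" then pyGetDA entry "repo_alias"
    else if pyGetDA entry "job_id" ≠ "" then pyGetDA entry "job_id"
    else "unknown"
  else if pyGetDA entry "event_type" = "git_cleanup" then
    if pyGetDA entry "repo_path" ≠ "" then pyGetDA entry "repo_path" else "unknown"
  else if pyGetDA entry "event_type" = "impersonation_set" ∨
      pyGetDA entry "event_type" = "impersonation_cleared" then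
    if pyGetDA entry "target_username" ≠ "" then pyGetDA entry "target_username"
    else if pyGetDA entry "previous_target" ≠ "" then pyGetDA entry "previous_target"
    else "unknown"
  else
    authLoopA entry ["username", "actor_username", "email"]

-- ===== PORT B =====
def ranksPR : List (String × Int) := [("repo_alias", 0), ("job_id", 1)]
def ranksCleanup : List (String × Int) := [("repo_path", 0)]
def ranksImp : List (String × Int) := [("target_username", 0), ("previous_target", 1)]
def ranksAuth : List (String × Int) := [("username", 0), ("actor_username", 1), ("email", 2)]

def rankTable : List (String × List (String × Int)) :=
    [ ("pr_creation_success", ranksPR)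
    , ("pr_creation_failure", ranksPR)
    , ("pr_creation_disabled", ranksPR)
    , ("git_cleanup", ranksCleanup)
    , ("impersonation_set", ranksImp)
    , ("impersonation_cleared", ranksImp) ]

-- `for key, value in entry.items(): rank = ranks.get(key); if rank is not None and value
--  and (best is None or rank < best[0]): best = (rank, value)` — short-circuit order kept.
def scanB (ranks : List (String × Int)) : List (String × String) → Option (Int × String) → Option (Int × String)
  | [], best => best
  | (key, value) :: rest, best =>
    match ranks.lookup key with
    | none => scanB ranks rest best
    | some r =>
      if value = "" then scanB ranks rest best
      else
        match best with
        | none => scanB ranks rest (some (r, value))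
        | some (br, _) => if r < br then scanB ranks rest (some (r, value)) else scanB ranks rest best

def extract_target_id_py_alt (entry : List (String × String)) : String :=
  match scanB ((rankTable.lookup ((entry.lookup "event_type").getD "")).getD ranksAuth)
      entry none with
  | some (_, v) => v
  | none => "unknown"

-- ===== PRECONDITION & SPEC =====
-- Pre_ excludes association lists with duplicate keys: they represent no Python dict (A's
-- parameter is a dict), and there A's first-match lookup vs B's whole-list scan is accidental.
def Pre_extract_target_id_py (entry : List (String × String)) : Prop :=
  (entry.map Prod.fst).Nodup
instance (entry : List (String × String)) : Decidable (Pre_extract_target_id_py entry) := by unfold Pre_extract_target_id_py; infer_instance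

def pvWitness_extract_target_id_py : (List (String × String)) :=
  [("event_type", "git_cleanup"), ("repo_path", "/tmp/r")]

def Spec_extract_target_id_py (entry : List (String × String)) (out : String) : Prop := out = extract_target_id_py_alt entry
instance (entry : List (String × String)) (out : String) : Decidable (Spec_extract_target_id_py entry out) := by unfold Spec_extract_target_id_py; infer_instance

-- ===== CLAIM (what is proved, stated in full; the proofs are below) =====
def Claim_equal_extract_target_id_py : Prop := ∀ (entry : List (String × String)), Dom_extract_target_id_py entry → Pre_extract_target_id_py entry → Spec_extract_target_id_py entry (extract_target_id_py entry)

-- ===== LEMMAS AND PROOFS =====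

-- the rank lists, as consecutive ranks from a start index (proof-side view of B's tables)
def ranksFrom (i : Int) : List String → List (String × Int)
  | [] => []
  | k :: ks => (k, i) :: ranksFrom (i + 1) ks

theorem mem_ranksFrom {p : String × Int} : ∀ (ks : List String) (i : Int), p ∈ ranksFrom i ks → i ≤ p.2 := by
  intro ks
  induction ks with
  | nil => intro i h; simp [ranksFrom] at h
  | cons k ks ih =>
    intro i h
    simp only [ranksFrom, List.mem_cons] at h
    rcases h with h | h
    · subst h; simp
    · have := ih (i + 1) h; omega

theorem lk_self {ν : Type} (k : String) (v : ν) (l : List (String × ν)) :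
    List.lookup k ((k, v) :: l) = some v := by
  rw [List.lookup_cons, beq_self_eq_true]

theorem lk_ne {ν : Type} {k k' : String} (v : ν) (l : List (String × ν)) (h : k' ≠ k) :
    List.lookup k' ((k, v) :: l) = List.lookup k' l := by
  rw [List.lookup_cons]
  cases hbe : k' == k with
  | false => rfl
  | true => exact absurd (by simpa using hbe) h

theorem lookup_mem {ν : Type} {l : List (String × ν)} {k : String} {v : ν}
    (h : l.lookup k = some v) : (k, v) ∈ l := by
  induction l with
  | nil => simp [List.lookup] at h
  | cons p l ih =>
    obtain ⟨a, b⟩ := p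
    by_cases hk : k = a
    · subst hk
      rw [lk_self] at h
      obtain rfl : b = v := by simpa using h
      exact List.mem_cons_self ..
    · rw [lk_ne b l hk] at h
      exact List.mem_cons_of_mem _ (ih h)

theorem lookup_none {ν : Type} {l : List (String × ν)} {k : String}
    (h : k ∉ l.map Prod.fst) : l.lookup k = none := by
  induction l with
  | nil => rfl
  | cons p l ih =>
    obtain ⟨a, b⟩ := p
    simp only [List.map_cons, List.mem_cons] at h
    push_neg at h
    rw [lk_ne b l h.1]
    exact ih h.2

theorem scanB_cons (ranks : List (String × Int)) (k : String) (w : String)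
    (rest : List (String × String)) (b : Option (Int × String)) :
    scanB ranks ((k, w) :: rest) b =
      match ranks.lookup k with
      | none => scanB ranks rest b
      | some r =>
        if w = "" then scanB ranks rest b
        else
          match b with
          | none => scanB ranks rest (some (r, w))
          | some (br, _) => if r < br then scanB ranks rest (some (r, w)) else scanB ranks rest b := rfl

-- once best holds a rank no candidate beats, the scan never changes it
theorem scan_stay (ranks : List (String × Int)) (r0 : Int) (v0 : String)
    (hmin : ∀ p ∈ ranks, ¬ p.2 < r0) :
    ∀ entry, scanB ranks entry (some (r0, v0)) = some (r0, v0) := by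
  intro entry
  induction entry with
  | nil => rfl
  | cons p rest ih =>
    obtain ⟨k, w⟩ := p
    cases hl : ranks.lookup k with
    | none => simpa [scanB_cons, hl] using ih
    | some r =>
      by_cases hw : w = ""
      · simpa [scanB_cons, hl, hw] using ih
      · have hnlt : ¬ r < r0 := hmin (k, r) (lookup_mem hl)
        simpa [scanB_cons, hl, hw, hnlt] using ih

-- a head candidate key whose value is falsy (or absent) contributes nothing
theorem scan_drop (k0 : String) (r0 : Int) (rr : List (String × Int)) :
    ∀ (entry : List (String × String)) (b : Option (Int × String)),
      (entry.map Prod.fst).Nodup → (entry.lookup k0).getD "" = "" →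
      scanB ((k0, r0) :: rr) entry b = scanB rr entry b := by
  intro entry
  induction entry with
  | nil => intro b _ _; rfl
  | cons p rest ih =>
    intro b hnd hget
    obtain ⟨k, w⟩ := p
    simp only [List.map_cons, List.nodup_cons] at hnd
    by_cases hk : k = k0
    · subst hk
      rw [lk_self] at hget
      obtain rfl : w = "" := by simpa using hget
      have hrest : (rest.lookup k).getD "" = "" := by
        rw [lookup_none hnd.1]
        rfl
      cases hl : rr.lookup k with
      | none => simpa [scanB_cons, lk_self, hl] using ih b hnd.2 hrest
      | some r' => simpa [scanB_cons, lk_self, hl] using ih b hnd.2 hrest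
    · have hget' : (rest.lookup k0).getD "" = "" := by
        rwa [lk_ne w rest (Ne.symm hk)] at hget
      have hkk0 : k0 ≠ k := Ne.symm hk
      cases hl : rr.lookup k with
      | none => simpa [scanB_cons, lk_ne r0 rr hk, hl] using ih b hnd.2 hget'
      | some r =>
        by_cases hw : w = ""
        · simpa [scanB_cons, lk_ne r0 rr hk, hl, hw] using ih b hnd.2 hget'
        · cases b with
          | none => simpa [scanB_cons, lk_ne r0 rr hk, hl, hw] using ih _ hnd.2 hget'
          | some q =>
            obtain ⟨br, bv⟩ := q
            by_cases hlt : r < br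
            · simpa [scanB_cons, lk_ne r0 rr hk, hl, hw, hlt] using ih _ hnd.2 hget'
            · simpa [scanB_cons, lk_ne r0 rr hk, hl, hw, hlt] using ih _ hnd.2 hget'

-- a truthy head candidate wins the whole scan
theorem scan_first (k0 : String) (r0 : Int) (rr : List (String × Int))
    (hrr : ∀ p ∈ rr, r0 < p.2) :
    ∀ (entry : List (String × String)) (b : Option (Int × String)) (v : String),
      entry.lookup k0 = some v → v ≠ "" →
      (b = none ∨ ∃ br bv, b = some (br, bv) ∧ r0 < br) →
      scanB ((k0, r0) :: rr) entry b = some (r0, v) := by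
  have hmin : ∀ p ∈ (k0, r0) :: rr, ¬ p.2 < r0 := by
    intro p hp
    rcases List.mem_cons.mp hp with h | h
    · subst h; omega
    · have := hrr p h; omega
  intro entry
  induction entry with
  | nil => intro b v h _ _; simp [List.lookup] at h
  | cons p rest ih =>
    intro b v hlook hv hb
    obtain ⟨k, w⟩ := p
    by_cases hk : k = k0
    · subst hk
      rw [lk_self] at hlook
      obtain rfl : w = v := by simpa using hlook
      rcases hb with rfl | ⟨br, bv, rfl, hbr⟩
      · simpa [scanB_cons, lk_self, hv] using scan_stay _ r0 w hmin rest
      · simpa [scanB_cons, lk_self, hv, hbr] using scan_stay _ r0 w hmin rest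
    · have hlook' : rest.lookup k0 = some v := by
        rwa [lk_ne w rest (Ne.symm hk)] at hlook
      have hkk0 : k0 ≠ k := Ne.symm hk
      cases hl : rr.lookup k with
      | none => simpa [scanB_cons, lk_ne r0 rr hk, hl] using ih b v hlook' hv hb
      | some r =>
        have hr : r0 < r := hrr (k, r) (lookup_mem hl)
        by_cases hw : w = ""
        · simpa [scanB_cons, lk_ne r0 rr hk, hl, hw] using ih b v hlook' hv hb
        · rcases hb with rfl | ⟨br, bv, rfl, hbr⟩
          · simpa [scanB_cons, lk_ne r0 rr hk, hl, hw] using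
              ih _ v hlook' hv (Or.inr ⟨r, w, rfl, hr⟩)
          · by_cases hlt : r < br
            · simpa [scanB_cons, lk_ne r0 rr hk, hl, hw, hlt] using
                ih _ v hlook' hv (Or.inr ⟨r, w, rfl, hr⟩)
            · simpa [scanB_cons, lk_ne r0 rr hk, hl, hw, hlt] using
                ih _ v hlook' hv (Or.inr ⟨br, bv, rfl, hbr⟩)

-- selecting the minimal-rank truthy item equals probing the keys in rank order
theorem scan_eq_authLoop : ∀ (ks : List String) (i : Int) (entry : List (String × String)),
    (entry.map Prod.fst).Nodup →
    (match scanB (ranksFrom i ks) entry none with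
      | some (_, v) => v
      | none => "unknown") = authLoopA entry ks := by
  intro ks
  induction ks with
  | nil =>
    intro i entry _
    suffices h : ∀ e : List (String × String), scanB [] e none = none by
      simp [ranksFrom, h, authLoopA]
    intro e
    induction e with
    | nil => rfl
    | cons p r ihe =>
      obtain ⟨k, w⟩ := p
      simpa [scanB_cons, List.lookup] using ihe
  | cons k ks ih =>
    intro i entry hnd
    by_cases hget : pyGetDA entry k = ""
    · rw [show ranksFrom i (k :: ks) = (k, i) :: ranksFrom (i + 1) ks from rfl,
        scan_drop k i (ranksFrom (i + 1) ks) entry none hnd hget, ih (i + 1) entry hnd]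
      simp [authLoopA, hget]
    · have hlook : entry.lookup k = some (pyGetDA entry k) := by
        cases hl : entry.lookup k with
        | none => exact absurd (by unfold pyGetDA; rw [hl]; rfl) hget
        | some v => unfold pyGetDA; rw [hl]; rfl
      rw [show ranksFrom i (k :: ks) = (k, i) :: ranksFrom (i + 1) ks from rfl,
        scan_first k i (ranksFrom (i + 1) ks)
          (fun p hp => by have := mem_ranksFrom ks (i + 1) hp; omega)
          entry none _ hlook hget (Or.inl rfl)]
      simp [authLoopA, hget]

theorem table_lookup (et : String) :
    (rankTable.lookup et).getD ranksAuth =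
      if et = "pr_creation_success" ∨ et = "pr_creation_failure" ∨ et = "pr_creation_disabled" then
        ranksPR
      else if et = "git_cleanup" then ranksCleanup
      else if et = "impersonation_set" ∨ et = "impersonation_cleared" then ranksImp
      else ranksAuth := by
  by_cases h1 : et = "pr_creation_success" ∨ et = "pr_creation_failure" ∨ et = "pr_creation_disabled"
  · rw [if_pos h1]; rcases h1 with h | h | h <;> subst h <;> rfl
  · rw [if_neg h1]
    by_cases h2 : et = "git_cleanup"
    · rw [if_pos h2]; subst h2; rfl
    · rw [if_neg h2]
      by_cases h3 : et = "impersonation_set" ∨ et = "impersonation_cleared"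
      · rw [if_pos h3]; rcases h3 with h | h <;> subst h <;> rfl
      · rw [if_neg h3]
        push Not at h1 h3
        obtain ⟨a, b, c⟩ := h1
        obtain ⟨d, e⟩ := h3
        simp [rankTable, List.lookup, beq_eq_false_iff_ne.mpr a, beq_eq_false_iff_ne.mpr b,
          beq_eq_false_iff_ne.mpr c, beq_eq_false_iff_ne.mpr h2, beq_eq_false_iff_ne.mpr d,
          beq_eq_false_iff_ne.mpr e]

theorem ranksPR_eq : ranksPR = ranksFrom 0 ["repo_alias", "job_id"] := by decide
theorem ranksCleanup_eq : ranksCleanup = ranksFrom 0 ["repo_path"] := by decide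
theorem ranksImp_eq : ranksImp = ranksFrom 0 ["target_username", "previous_target"] := by decide
theorem ranksAuth_eq : ranksAuth = ranksFrom 0 ["username", "actor_username", "email"] := by decide

-- ===== VERDICT (by name: the statement is the Claim_ definition above) =====
theorem extract_target_id_py_spec : Claim_equal_extract_target_id_py := by
  intro entry _ hpre
  unfold Spec_extract_target_id_py extract_target_id_py extract_target_id_py_alt
  rw [show (entry.lookup "event_type").getD "" = pyGetDA entry "event_type" from rfl, table_lookup]
  by_cases h1 : pyGetDA entry "event_type" = "pr_creation_success" ∨
      pyGetDA entry "event_type" = "pr_creation_failure" ∨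
      pyGetDA entry "event_type" = "pr_creation_disabled"
  · rw [if_pos h1, if_pos h1, ranksPR_eq, scan_eq_authLoop _ _ _ hpre]
    simp [authLoopA]
  · rw [if_neg h1, if_neg h1]
    by_cases h2 : pyGetDA entry "event_type" = "git_cleanup"
    · rw [if_pos h2, if_pos h2, ranksCleanup_eq, scan_eq_authLoop _ _ _ hpre]
      simp [authLoopA]
    · rw [if_neg h2, if_neg h2]
      by_cases h3 : pyGetDA entry "event_type" = "impersonation_set" ∨
          pyGetDA entry "event_type" = "impersonation_cleared"
      · rw [if_pos h3, if_pos h3, ranksImp_eq, scan_eq_authLoop _ _ _ hpre]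
        simp [authLoopA]
      · rw [if_neg h3, if_neg h3, ranksAuth_eq, scan_eq_authLoop _ _ _ hpre]
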